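-- pv_equiv track=rewrite | github.com/DryHop2/hoopla | cli/semantic_search_cli.py | overlapping_chunks
-- ===== SOURCE A (Python) =====
-- def overlapping_chunks(seq: str, chunk_size: int, overlap: int) -> list[list[str]]:
--     if chunk_size <= 0:
--         raise ValueError("chunk_size must be positive")
--
--     if overlap < 0:
--         raise ValueError("overlap cannot be negative")
--
--     if overlap == 0:
--         return [
--             seq[i:i + chunk_size]
--             for i in range(0, len(seq), chunk_size)
--         ]
--
--     step = chunk_size - overlap
--     if step <= 0:
--         raise ValueError("--overlap must be smaller than --chunk-size")
--
--     chunks: list[list[str]] = []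
--     idx = 0
--     n = len(seq)
--
--     while idx < n:
--         chunk = seq[idx:idx + chunk_size]
--         if not chunk:
--             break
--
--         if chunks and len(chunk) <= overlap:
--             break
--
--         chunks.append(chunk)
--
--         if len(chunk) < chunk_size:
--             break
--
--         idx += step
--
--     return chunks
-- ===== SOURCE B (Python) =====
-- def overlapping_chunks(seq: str, chunk_size: int, overlap: int) -> list[list[str]]:
--     if chunk_size <= 0:
--         raise ValueError("chunk_size must be positive")
--     if overlap < 0:
--         raise ValueError("overlap cannot be negative")
--     if overlap == 0:
--         return [seq[i:i + chunk_size] for i in range(0, len(seq), chunk_size)]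
--     step = chunk_size - overlap
--     if step <= 0:
--         raise ValueError("--overlap must be smaller than --chunk-size")
--     n = len(seq)
--     full = [seq[i:i + chunk_size] for i in range(0, n, step) if i + chunk_size <= n]
--     tail = len(full) * step
--     if tail < n and (not full or n - tail > overlap):
--         full.append(seq[tail:])
--     return full
-- ===== Notes on version B (the rewrite author's own statement) =====
-- stated objective: alternative
-- what changed: Replaces A's stateful while-loop (mutable idx/chunks with three break conditions) by a range comprehension that collects all full chunks in one shot plus a single arithmetic decision about the trailing partial chunk.
import Mathlib
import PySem

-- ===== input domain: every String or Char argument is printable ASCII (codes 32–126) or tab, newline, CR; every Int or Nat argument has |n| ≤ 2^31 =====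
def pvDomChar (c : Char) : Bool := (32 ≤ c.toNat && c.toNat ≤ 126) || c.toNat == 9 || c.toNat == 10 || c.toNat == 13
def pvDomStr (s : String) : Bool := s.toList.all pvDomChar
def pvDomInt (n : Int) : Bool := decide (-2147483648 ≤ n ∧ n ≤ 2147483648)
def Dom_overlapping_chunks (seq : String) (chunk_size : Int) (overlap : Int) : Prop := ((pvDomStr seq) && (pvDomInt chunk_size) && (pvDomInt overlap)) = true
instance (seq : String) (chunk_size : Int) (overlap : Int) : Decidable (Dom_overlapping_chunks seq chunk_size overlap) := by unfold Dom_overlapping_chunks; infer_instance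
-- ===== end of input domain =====

-- B replaces A's stateful while-loop by a one-pass range comprehension for the
-- full chunks plus a single trailing-partial decision (objective: alternative decomposition).

-- ===== PORT A =====
-- A's while-loop, as structural recursion on the remaining length (n - idx).
-- The `0 < step` test is only a totality guard: Python reaches the loop only with step > 0.
def ocLoopA (l : List Char) (n cs ov step : Int) (chunks : List String) (idx : Int) : List String :=
  if _h : idx < n then
    if (PySem.Chars.slice l (some idx) (some (idx + cs))) = [] then chunks
    else if chunks ≠ [] ∧ (((PySem.Chars.slice l (some idx) (some (idx + cs))).length : Int) ≤ ov) then chunks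
    else if ((PySem.Chars.slice l (some idx) (some (idx + cs))).length : Int) < cs then
      chunks ++ [String.ofList (PySem.Chars.slice l (some idx) (some (idx + cs)))]
    else if _hs : 0 < step then
      ocLoopA l n cs ov step (chunks ++ [String.ofList (PySem.Chars.slice l (some idx) (some (idx + cs)))]) (idx + step)
    else chunks ++ [String.ofList (PySem.Chars.slice l (some idx) (some (idx + cs)))]
  else chunks
termination_by (n - idx).toNat
decreasing_by omega

def overlapping_chunks (seq : String) (chunk_size : Int) (overlap : Int) : List String :=
  if chunk_size ≤ 0 then []          -- Python raises ValueError; excluded by Pre_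
  else if overlap < 0 then []        -- Python raises ValueError; excluded by Pre_
  else if overlap = 0 then
    (PySem.List.pyRange 0 (PySem.Str.len seq) chunk_size).map
      (fun i => String.ofList (PySem.Chars.slice seq.toList (some i) (some (i + chunk_size))))
  else if chunk_size - overlap ≤ 0 then []   -- Python raises ValueError; excluded by Pre_
  else ocLoopA seq.toList (PySem.Str.len seq) chunk_size overlap (chunk_size - overlap) [] 0

-- ===== PORT B =====
def overlapping_chunks_alt (seq : String) (chunk_size : Int) (overlap : Int) : List String :=
  if chunk_size ≤ 0 then []          -- Python raises ValueError; excluded by Pre_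
  else if overlap < 0 then []        -- Python raises ValueError; excluded by Pre_
  else if overlap = 0 then
    (PySem.List.pyRange 0 (PySem.Str.len seq) chunk_size).map
      (fun i => String.ofList (PySem.Chars.slice seq.toList (some i) (some (i + chunk_size))))
  else if chunk_size - overlap ≤ 0 then []   -- Python raises ValueError; excluded by Pre_
  else
    let n := PySem.Str.len seq
    let full := ((PySem.List.pyRange 0 n (chunk_size - overlap)).filter (fun i => i + chunk_size ≤ n)).map
      (fun i => String.ofList (PySem.Chars.slice seq.toList (some i) (some (i + chunk_size))))
    let tail := (full.length : Int) * (chunk_size - overlap)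
    if tail < n ∧ (full = [] ∨ n - tail > overlap) then
      full ++ [String.ofList (PySem.Chars.slice seq.toList (some tail) none)]
    else full

-- ===== PRECONDITION & SPEC =====
-- Pre_ excludes exactly the inputs on which A raises ValueError (non-positive
-- chunk_size, negative overlap, or 0 < overlap with chunk_size - overlap ≤ 0).
def Pre_overlapping_chunks (seq : String) (chunk_size : Int) (overlap : Int) : Prop :=
  0 < chunk_size ∧ 0 ≤ overlap ∧ (overlap = 0 ∨ 0 < chunk_size - overlap)

instance (seq : String) (chunk_size : Int) (overlap : Int) : Decidable (Pre_overlapping_chunks seq chunk_size overlap) := by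
  unfold Pre_overlapping_chunks; infer_instance

def pvWitness_overlapping_chunks : String × Int × Int := ("abcdefgh", 3, 1)

def Spec_overlapping_chunks (seq : String) (chunk_size : Int) (overlap : Int) (out : List String) : Prop :=
  out = overlapping_chunks_alt seq chunk_size overlap
instance (seq : String) (chunk_size : Int) (overlap : Int) (out : List String) : Decidable (Spec_overlapping_chunks seq chunk_size overlap out) := by
  unfold Spec_overlapping_chunks; infer_instance

-- ===== CLAIM (what is proved, stated in full; the proofs are below) =====
def Claim_equal_overlapping_chunks : Prop := ∀ (seq : String) (chunk_size : Int) (overlap : Int), Dom_overlapping_chunks seq chunk_size overlap → Pre_overlapping_chunks seq chunk_size overlap → Spec_overlapping_chunks seq chunk_size overlap (overlapping_chunks seq chunk_size overlap)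

-- ===== LEMMAS AND PROOFS =====

-- Common recursive description of the chunk list from position idx on; `first`
-- records whether the chunk list built so far is empty.
def ocRest (l : List Char) (n cs ov step : Int) (idx : Int) (first : Bool) : List String :=
  if _h : idx < n then
    if idx + cs ≤ n then
      String.ofList (PySem.Chars.slice l (some idx) (some (idx + cs))) ::
        (if _hs : 0 < step then ocRest l n cs ov step (idx + step) false else [])
    else if ¬first ∧ n - idx ≤ ov then []
    else [String.ofList (PySem.Chars.slice l (some idx) none)]
  else []
termination_by (n - idx).toNat
decreasing_by omega

lemma pyRange_pos_nil {a b s : Int} (hab : b ≤ a) (hs : 0 < s) :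
    PySem.List.pyRange a b s = [] := by
  rw [PySem.List.pyRange_of_pos _ _ hs, if_neg (by omega)]
  simp

lemma pyRange_pos_cons {a b s : Int} (hab : a < b) (hs : 0 < s) :
    PySem.List.pyRange a b s = a :: PySem.List.pyRange (a + s) b s := by
  rw [PySem.List.pyRange_of_pos _ _ hs, PySem.List.pyRange_of_pos _ _ hs]
  have h2 : (b - a + s - 1) / s = (b - a - 1) / s + 1 := by
    have h1 : b - a + s - 1 = (b - a - 1) + 1 * s := by ring
    rw [h1, Int.add_mul_ediv_right _ _ (by omega : s ≠ 0)]
  have h3 : 0 ≤ (b - a - 1) / s := Int.ediv_nonneg (by omega) (by omega)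
  rw [if_pos hab]
  have h4 : ((b - a + s - 1) / s).toNat = ((b - a - 1) / s).toNat + 1 := by omega
  rw [h4, List.range_succ_eq_map, List.map_cons]
  simp only [Nat.cast_zero, mul_zero, add_zero]
  congr 1
  rw [List.map_map]
  by_cases h5 : a + s < b
  · rw [if_pos h5]
    have hbs : b - (a + s) + s - 1 = b - a - 1 := by ring
    rw [hbs]
    apply List.map_congr_left
    intro k _
    simp only [Function.comp_apply, Nat.succ_eq_add_one]
    push_cast
    ring
  · rw [if_neg h5]
    have : (b - a - 1) / s = 0 := Int.ediv_eq_zero_of_lt (by omega) (by omega)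
    simp [this]

-- length of the chunk at position idx
lemma chunk_length (l : List Char) {idx cs : Int} (h0 : 0 ≤ idx) (hcs : 0 ≤ cs) :
    ((PySem.Chars.slice l (some idx) (some (idx + cs))).length : Int)
      = min (idx + cs) (l.length : Int) - min idx (l.length : Int) := by
  show ((PySem.List.slice l (some idx) (some (idx + cs))).length : Int) = _
  rw [PySem.List.length_slice]
  simp only [PySem.List.clampIdx, if_neg (by omega : ¬ (idx + cs) < 0), if_neg (by omega : ¬ idx < 0)]
  omega

-- the partial chunk at idx is the whole tail of the string
lemma chunk_tail (l : List Char) {idx cs : Int} (h0 : 0 ≤ idx) (hn : (l.length : Int) ≤ idx + cs) :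
    PySem.Chars.slice l (some idx) (some (idx + cs)) = PySem.Chars.slice l (some idx) none := by
  show PySem.List.slice l (some idx) (some (idx + cs)) = PySem.List.slice l (some idx) none
  rw [PySem.List.slice_toNat l h0 (show (0:Int) ≤ idx + cs by omega), PySem.List.slice_some_none]
  simp only [PySem.List.clampIdx, if_neg (by omega : ¬ idx < 0)]
  rcases le_or_gt idx (l.length : Int) with h | h
  · rw [min_eq_left (by omega)]
    apply List.take_of_length_le
    simp; omega
  · rw [min_eq_right (by omega)]
    simp [List.drop_of_length_le]
    omega

-- A-side: the loop from idx equals chunks ++ ocRest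
lemma loopA_eq_rest (l : List Char) (n cs ov step : Int)
    (hn : n = (l.length : Int)) (hstep : 0 < step) (hov : 0 < ov) (hcs : cs = step + ov) :
    ∀ (m : Nat) (idx : Int), (n - idx).toNat ≤ m → 0 ≤ idx → ∀ (chunks : List String),
      ocLoopA l n cs ov step chunks idx = chunks ++ ocRest l n cs ov step idx chunks.isEmpty := by
  intro m
  induction m with
  | zero =>
    intro idx hm h0 chunks
    rw [ocLoopA, ocRest, dif_neg (by omega), dif_neg (by omega)]
    simp
  | succ m ih =>
    intro idx hm h0 chunks
    by_cases hlt : idx < n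
    · have hlen := chunk_length l h0 (by omega : (0:Int) ≤ cs)
      have hne : PySem.Chars.slice l (some idx) (some (idx + cs)) ≠ [] := by
        intro hnil
        rw [hnil] at hlen
        simp at hlen
        omega
      rw [ocLoopA, ocRest, dif_pos hlt, dif_pos hlt, if_neg hne]
      by_cases hfull : idx + cs ≤ n
      · -- full chunk
        have hlc : ((PySem.Chars.slice l (some idx) (some (idx + cs))).length : Int) = cs := by
          rw [hlen]; omega
        rw [if_neg (by rw [hlc]; rintro ⟨_, h⟩; omega), if_neg (by rw [hlc]; omega),
          if_pos hfull, dif_pos hstep, dif_pos hstep]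
        rw [ih (idx + step) (by omega) (by omega)]
        have hie : (chunks ++ [String.ofList (PySem.Chars.slice l (some idx) (some (idx + cs)))]).isEmpty = false := by simp
        rw [hie]
        simp
      · -- partial chunk
        have hlc : ((PySem.Chars.slice l (some idx) (some (idx + cs))).length : Int) = n - idx := by
          rw [hlen]; omega
        rw [if_neg (by omega : ¬ idx + cs ≤ n)]
        by_cases hbrk : chunks ≠ [] ∧ n - idx ≤ ov
        · rw [if_pos (by rw [hlc]; exact hbrk), if_pos (by simpa [List.isEmpty_iff] using hbrk)]
          simp
        · rw [if_neg (by rw [hlc]; exact hbrk), if_pos (by rw [hlc]; omega),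
            if_neg (by simpa [List.isEmpty_iff] using hbrk)]
          rw [chunk_tail l h0 (by omega)]
    · rw [ocLoopA, ocRest, dif_neg hlt, dif_neg hlt]
      simp

-- B-side: ocRest equals the comprehension form
lemma rest_eq_comp (l : List Char) (n cs ov step : Int)
    (hn : n = (l.length : Int)) (hstep : 0 < step) (hov : 0 < ov) (hcs : cs = step + ov) :
    ∀ (m : Nat) (idx : Int), (n - idx).toNat ≤ m → 0 ≤ idx → ∀ (first : Bool),
      ocRest l n cs ov step idx first =
        (let full := ((PySem.List.pyRange idx n step).filter (fun i => i + cs ≤ n)).map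
            (fun i => String.ofList (PySem.Chars.slice l (some i) (some (i + cs))));
         let tail := idx + (full.length : Int) * step;
         if tail < n ∧ ((first = true ∧ full = []) ∨ n - tail > ov) then
           full ++ [String.ofList (PySem.Chars.slice l (some tail) none)]
         else full) := by
  intro m
  induction m with
  | zero =>
    intro idx hm h0 first
    rw [ocRest, dif_neg (by omega)]
    rw [pyRange_pos_nil (by omega) hstep]
    simp only [List.filter_nil, List.map_nil, List.length_nil]
    rw [if_neg (by push_cast; omega)]
  | succ m ih =>
    intro idx hm h0 first
    by_cases hlt : idx < n
    · rw [ocRest, dif_pos hlt, pyRange_pos_cons hlt hstep]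
      by_cases hfull : idx + cs ≤ n
      · rw [if_pos hfull, dif_pos hstep, ih (idx + step) (by omega) (by omega) false]
        simp only [List.filter_cons, decide_eq_true_eq, if_pos hfull, List.map_cons,
          List.length_cons]
        have htail : idx + (((((PySem.List.pyRange (idx + step) n step).filter
            (fun i => i + cs ≤ n)).map (fun i => String.ofList (PySem.Chars.slice l (some i) (some (i + cs))))).length : Int) + 1) * step
            = (idx + step) + ((((PySem.List.pyRange (idx + step) n step).filter
            (fun i => i + cs ≤ n)).map (fun i => String.ofList (PySem.Chars.slice l (some i) (some (i + cs))))).length : Int) * step := by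
          ring
        push_cast
        rw [htail]
        by_cases hc : (idx + step) + ((((PySem.List.pyRange (idx + step) n step).filter
            (fun i => i + cs ≤ n)).map (fun i => String.ofList (PySem.Chars.slice l (some i) (some (i + cs))))).length : Int) * step < n
            ∧ n - ((idx + step) + ((((PySem.List.pyRange (idx + step) n step).filter
            (fun i => i + cs ≤ n)).map (fun i => String.ofList (PySem.Chars.slice l (some i) (some (i + cs))))).length : Int) * step) > ov
        · rw [if_pos (by simpa using hc), if_pos (by exact ⟨hc.1, Or.inr hc.2⟩)]
          simp only [List.cons_append]
        · rw [if_neg (by simpa using hc),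
            if_neg (by
              rintro ⟨h1, hcon⟩
              rcases hcon with ⟨-, habs⟩ | h2
              · exact absurd habs (by simp)
              · exact hc ⟨h1, h2⟩)]
      · -- partial: no index from idx on yields a full chunk
        have hfilt : (idx :: PySem.List.pyRange (idx + step) n step).filter (fun i => i + cs ≤ n) = [] := by
          rw [List.filter_eq_nil_iff]
          intro i hi
          simp only [decide_eq_true_eq]
          rcases List.mem_cons.mp hi with h | h
          · omega
          · have := (PySem.List.mem_pyRange_iff_of_pos hstep i).mp h
            omega
        rw [hfilt, if_neg hfull]
        simp only [List.map_nil, List.length_nil, Nat.cast_zero, zero_mul, add_zero]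
        by_cases hf : first = true
        · rw [if_neg (by simp [hf]), if_pos (by exact ⟨hlt, Or.inl ⟨hf, trivial⟩⟩)]
          simp
        · have hf' : first = false := by simpa using hf
          by_cases hle : n - idx ≤ ov
          · rw [if_pos ⟨by simp [hf'], hle⟩,
              if_neg (by
                rintro ⟨-, hcon | hcon⟩
                · exact absurd hcon.1 (by simp [hf'])
                · omega)]
          · rw [if_neg (by rintro ⟨_, h⟩; omega), if_pos ⟨hlt, Or.inr (by omega)⟩]
            simp
    · rw [ocRest, dif_neg hlt, pyRange_pos_nil (by omega) hstep]
      simp only [List.filter_nil, List.map_nil, List.length_nil]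
      rw [if_neg (by push_cast; omega)]

-- ===== VERDICT (by name: the statement is the Claim_ definition above) =====
theorem overlapping_chunks_spec : Claim_equal_overlapping_chunks := by
  intro seq cs ov _hdom hpre
  obtain ⟨hcs, hov0, hcase⟩ := hpre
  show overlapping_chunks seq cs ov = overlapping_chunks_alt seq cs ov
  by_cases hz : ov = 0
  · unfold overlapping_chunks overlapping_chunks_alt
    rw [if_neg (by omega : ¬ cs ≤ 0), if_neg (by omega : ¬ ov < 0), if_pos hz,
      if_neg (by omega : ¬ cs ≤ 0), if_neg (by omega : ¬ ov < 0), if_pos hz]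
  · have hstep : 0 < cs - ov := by rcases hcase with h | h <;> omega
    unfold overlapping_chunks overlapping_chunks_alt
    rw [if_neg (by omega : ¬ cs ≤ 0), if_neg (by omega : ¬ ov < 0), if_neg hz,
      if_neg (by omega : ¬ cs - ov ≤ 0),
      if_neg (by omega : ¬ cs ≤ 0), if_neg (by omega : ¬ ov < 0), if_neg hz,
      if_neg (by omega : ¬ cs - ov ≤ 0)]
    have hn : PySem.Str.len seq = (seq.toList.length : Int) := PySem.Str.len_eq seq
    rw [loopA_eq_rest seq.toList (PySem.Str.len seq) cs ov (cs - ov) hn hstep (by omega) (by ring)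
        (PySem.Str.len seq - 0).toNat 0 (by omega) (by omega) [],
      rest_eq_comp seq.toList (PySem.Str.len seq) cs ov (cs - ov) hn hstep (by omega) (by ring)
        (PySem.Str.len seq - 0).toNat 0 (by omega) (by omega)]
    simp
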